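-- pv_equiv track=rewrite | github.com/Patvath88/4-Ball-Scramble | streamlit_app.py | compute_ties
-- ===== SOURCE A (Python) =====
-- from typing import Dict, List, Optional, Tuple
--
-- def ordinal(n:int)->str:
--     return f"{n}{'th' if 10<=n%100<=20 else {1:'st',2:'nd',3:'rd'}.get(n%10,'th')}"
--
-- def compute_ties(players: List[str], points: Dict[str,int]) -> Tuple[Dict[str,str], Dict[str,str], Dict[str,int]]:
--     ordered = sorted(((p, points.get(p,0)) for p in players), key=lambda kv:(-kv[1], kv[0]))
--     labels:Dict[str,str]={}; notes:Dict[str,str]={}; ranks:Dict[str,int]={}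
--     i=0; rank=0
--     while i < len(ordered):
--         j=i+1
--         while j<len(ordered) and ordered[j][1]==ordered[i][1]: j+=1
--         group=[p for p,_ in ordered[i:j]]; rank+=1
--         if len(group)>1:
--             for p in group:
--                 labels[p]=f"T-{rank}"; ranks[p]=rank
--                 others=[x for x in group if x!=p]
--                 notes[p]=f"tied with {', '.join(others)} for {ordinal(rank)}"
--         else:
--             labels[group[0]]=str(rank); ranks[group[0]]=rank; notes[group[0]]=""
--         i=j
--     return labels, notes, ranks
-- ===== SOURCE B (Python) =====
-- from typing import Dict, List, Tuple
--
-- def ordinal(n: int) -> str: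
--     return f"{n}{'th' if 10<=n%100<=20 else {1:'st',2:'nd',3:'rd'}.get(n%10,'th')}"
--
-- def compute_ties(players: List[str], points: Dict[str, int]) -> Tuple[Dict[str, str], Dict[str, str], Dict[str, int]]:
--     # One pass over the sorted entries; each entry's dense rank and tie group are
--     # computed directly (distinct higher values / value multiplicity) instead of
--     # scanning consecutive runs with index/rank counters.
--     ordered = sorted(((p, points.get(p, 0)) for p in players), key=lambda kv: (-kv[1], kv[0]))
--     values = [v for _, v in ordered]
--     labels: Dict[str, str] = {}
--     notes: Dict[str, str] = {}
--     ranks: Dict[str, int] = {}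
--     for p, v in ordered:
--         rank = len({u for u in values if u > v}) + 1
--         if values.count(v) > 1:
--             labels[p] = f"T-{rank}"
--             ranks[p] = rank
--             others = [q for q, u in ordered if u == v and q != p]
--             notes[p] = f"tied with {', '.join(others)} for {ordinal(rank)}"
--         else:
--             labels[p] = str(rank)
--             ranks[p] = rank
--             notes[p] = ""
--     return labels, notes, ranks
-- ===== Notes on version B (the rewrite author's own statement) =====
-- stated objective: alternative
-- what changed: Replaces the index-based while/while run-scan with a mutable rank counter by a single pass over the sorted entries in which each entry's dense rank is computed directly as 1 + the number of distinct higher point values, its tie-group membership as the multiplicity of its value, and its tie note by filtering the whole sorted list for its value.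
import Mathlib
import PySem

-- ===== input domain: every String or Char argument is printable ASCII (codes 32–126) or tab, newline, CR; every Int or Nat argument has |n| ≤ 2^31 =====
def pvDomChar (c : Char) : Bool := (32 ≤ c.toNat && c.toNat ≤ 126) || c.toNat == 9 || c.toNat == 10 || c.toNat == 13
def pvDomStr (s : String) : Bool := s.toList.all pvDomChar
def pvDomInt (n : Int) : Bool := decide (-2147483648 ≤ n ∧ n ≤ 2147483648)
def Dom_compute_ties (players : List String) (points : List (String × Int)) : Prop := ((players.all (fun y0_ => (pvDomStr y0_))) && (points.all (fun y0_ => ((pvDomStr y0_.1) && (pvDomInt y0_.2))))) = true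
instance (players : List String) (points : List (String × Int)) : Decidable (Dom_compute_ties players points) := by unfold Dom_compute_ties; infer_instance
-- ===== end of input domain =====

-- B replaces A's index-based run-scan (nested whiles with a mutable rank counter) by one pass
-- over the sorted entries computing each entry's dense rank and tie group directly; same results,
-- similar cost ("alternative", no speed claim).

-- ===== PORT A =====

-- shared module-level helper `ordinal` (f-string with chained comparison and a literal dict lookup)
def ordinal (n : Int) : String :=
  PySem.Int.toStr n ++
    (if 10 ≤ PySem.Int.mod n 100 ∧ PySem.Int.mod n 100 ≤ 20 then "th"
     else (PySem.Dict.mk [((1 : Int), "st"), ((2 : Int), "nd"), ((3 : Int), "rd")]).getD (PySem.Int.mod n 10) "th")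

-- state: the three dicts (labels, notes, ranks)
abbrev TieSt := PySem.Dict String String × PySem.Dict String String × PySem.Dict String Int

-- body of A's outer while-loop after the group was cut: emit one group at rank `rank`
def aEmitGroup (st : TieSt) (group : List String) (rank : Int) : TieSt :=
  if 1 < group.length then
    group.foldl (fun st p =>
      (st.1.insert p ("T-" ++ PySem.Int.toStr rank),
       st.2.1.insert p ("tied with " ++ PySem.Str.join ", " (group.filter (fun x => x != p)) ++ " for " ++ ordinal rank),
       st.2.2.insert p rank)) st
  else
    match group with
    | [] => st  -- unreachable: A's groups are nonempty (group[0] would raise only here)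
    | g :: _ => (st.1.insert g (PySem.Int.toStr rank), st.2.1.insert g "", st.2.2.insert g rank)

-- A's outer while over `ordered`: the inner `while j<len and ordered[j][1]==ordered[i][1]` j-scan
-- on the suffix after i is exactly takeWhile/dropWhile of the equal-value run on the tail (exact).
def aLoop (l : List (String × Int)) (rank : Int) (st : TieSt) : TieSt :=
  match l with
  | [] => st
  | (p, v) :: rest =>
    aLoop (rest.dropWhile (fun q => q.2 == v)) (rank + 1)
      (aEmitGroup st (((p, v) :: rest.takeWhile (fun q => q.2 == v)).map (·.1)) (rank + 1))
  termination_by l.length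
  decreasing_by simp only [List.length_cons]; exact Nat.lt_succ_of_le (List.length_dropWhile_le _ _)

def compute_ties (players : List String) (points : List (String × Int)) : (List (String × String)) × (List (String × String)) × (List (String × Int)) :=
  let ordered := PySem.List.sorted2 (players.map (fun p => (p, (PySem.Dict.mk points).getD p 0)))
      (fun kv => -kv.2) (fun kv => kv.1) false
  let res := aLoop ordered 0 (PySem.Dict.empty, PySem.Dict.empty, PySem.Dict.empty)
  (res.1.items, res.2.1.items, res.2.2.items)

-- ===== PORT B =====

-- one loop iteration of B: dense rank = distinct higher values + 1; tie iff the value repeats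
def bStep (ordered : List (String × Int)) (values : List Int) (st : TieSt) (pv : String × Int) : TieSt :=
  let rank : Int := ((PySem.Set.ofList (values.filter (fun u => decide (pv.2 < u)))).length : Int) + 1
  if 1 < values.count pv.2 then
    (st.1.insert pv.1 ("T-" ++ PySem.Int.toStr rank),
     st.2.1.insert pv.1 ("tied with " ++ PySem.Str.join ", " ((ordered.filter (fun q => q.2 == pv.2 && q.1 != pv.1)).map (·.1)) ++ " for " ++ ordinal rank),
     st.2.2.insert pv.1 rank)
  else
    (st.1.insert pv.1 (PySem.Int.toStr rank), st.2.1.insert pv.1 "", st.2.2.insert pv.1 rank)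

def compute_ties_alt (players : List String) (points : List (String × Int)) : (List (String × String)) × (List (String × String)) × (List (String × Int)) :=
  let ordered := PySem.List.sorted2 (players.map (fun p => (p, (PySem.Dict.mk points).getD p 0)))
      (fun kv => -kv.2) (fun kv => kv.1) false
  let values := ordered.map (·.2)
  let res := ordered.foldl (bStep ordered values) (PySem.Dict.empty, PySem.Dict.empty, PySem.Dict.empty)
  (res.1.items, res.2.1.items, res.2.2.items)

-- ===== PRECONDITION & SPEC =====
def Spec_compute_ties (players : List String) (points : List (String × Int)) (out : (List (String × String)) × (List (String × String)) × (List (String × Int))) : Prop := out = compute_ties_alt players points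
instance (players : List String) (points : List (String × Int)) (out : (List (String × String)) × (List (String × String)) × (List (String × Int))) : Decidable (Spec_compute_ties players points out) := by unfold Spec_compute_ties; infer_instance

-- ===== CLAIM (what is proved, stated in full; the proofs are below) =====
def Claim_equal_compute_ties : Prop := ∀ (players : List String) (points : List (String × Int)), Dom_compute_ties players points → Spec_compute_ties players points (compute_ties players points)

-- ===== LEMMAS AND PROOFS =====

-- insertion by a boolean comparison preserves any transitive relation it refines
lemma pairwise_insertBy_of {α : Type} (before : α → α → Bool) (R : α → α → Prop)
    (htrans : ∀ a b c, R a b → R b c → R a c)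
    (h1 : ∀ a b, before a b = true → R a b) (h2 : ∀ a b, before a b = false → R b a)
    (x : α) (ys : List α) (hy : ys.Pairwise R) :
    (PySem.List.insertBy before x ys).Pairwise R := by
  induction ys with
  | nil => simp [PySem.List.insertBy]
  | cons y ys ih =>
    rcases List.pairwise_cons.mp hy with ⟨hyys, hys⟩
    rw [PySem.List.insertBy]
    by_cases hb : before x y
    · simp only [hb, if_true]
      refine List.pairwise_cons.mpr ⟨?_, hy⟩
      intro z hz
      rcases List.mem_cons.mp hz with rfl | hz
      · exact h1 _ _ hb
      · exact htrans _ _ _ (h1 _ _ hb) (hyys z hz)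
    · simp only [hb]
      refine List.pairwise_cons.mpr ⟨?_, ih hys⟩
      intro z hz
      rcases (PySem.List.mem_insertBy _ _ _ _).mp hz with rfl | hz
      · exact h2 _ _ (by simpa using hb)
      · exact hyys z hz

lemma pairwise_foldl_insertBy {α : Type} (before : α → α → Bool) (R : α → α → Prop)
    (htrans : ∀ a b c, R a b → R b c → R a c)
    (h1 : ∀ a b, before a b = true → R a b) (h2 : ∀ a b, before a b = false → R b a)
    (xs acc : List α) (hacc : acc.Pairwise R) :
    (xs.foldl (fun a x => PySem.List.insertBy before x a) acc).Pairwise R := by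
  induction xs generalizing acc with
  | nil => exact hacc
  | cons x xs ih => exact ih _ (pairwise_insertBy_of before R htrans h1 h2 x acc hacc)

-- the sort key (-points, name) makes the point values non-increasing along `ordered`
lemma sorted2_snd_ge (xs : List (String × Int)) :
    (PySem.List.sorted2 xs (fun kv => -kv.2) (fun kv => kv.1) false).Pairwise (fun a b => b.2 ≤ a.2) := by
  rw [PySem.List.sorted2]
  simp only [Bool.false_eq_true, if_false]
  refine pairwise_foldl_insertBy _ _ (fun a b c (h1 : b.2 ≤ a.2) (h2 : c.2 ≤ b.2) => le_trans h2 h1) ?_ ?_ xs [] (by simp)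
  · intro a b h
    rcases Bool.or_eq_true_iff.mp h with h | h
    · have h' : -a.2 < -b.2 := of_decide_eq_true h
      omega
    · have h' : ¬(-b.2 < -a.2) := by simpa using (Bool.and_eq_true_iff.mp h).1
      omega
  · intro a b h
    have h' : ¬(-a.2 < -b.2) := by
      rcases Bool.or_eq_false_iff.mp h with ⟨h1, _⟩
      simpa using h1
    omega

-- appending k ≥ 1 copies of a fresh value adds exactly one element to the set
lemma ofList_append_replicate_len {α : Type} [BEq α] [LawfulBEq α] (l : List α) (v : α) (k : Nat)
    (hk : 1 ≤ k) (hv : v ∉ l) :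
    (PySem.Set.ofList (l ++ List.replicate k v)).length = (PySem.Set.ofList l).length + 1 := by
  have habs : ∀ (m : Nat) (s : PySem.Set α), v ∈ s → (List.replicate m v).foldl PySem.Set.add s = s := by
    intro m
    induction m with
    | zero => intro s _; rfl
    | succ m ih =>
      intro s hs
      simp only [List.replicate_succ, List.foldl_cons]
      rw [show PySem.Set.add s v = s by simp [PySem.Set.add, PySem.Set.contains, hs]]
      exact ih s hs
  obtain ⟨k', rfl⟩ : ∃ k', k = k' + 1 := ⟨k - 1, by omega⟩
  rw [PySem.Set.ofList_eq_foldl, List.foldl_append, ← PySem.Set.ofList_eq_foldl]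
  simp only [List.replicate_succ, List.foldl_cons]
  have hnm : v ∉ PySem.Set.ofList l := fun h => hv ((PySem.Set.mem_ofList l v).mp h)
  rw [show PySem.Set.add (PySem.Set.ofList l) v = PySem.Set.ofList l ++ [v] by
    simp [PySem.Set.add, PySem.Set.contains, hnm]]
  rw [habs k' _ (by simp)]
  simp

-- the first element surviving the equal-value dropWhile has a different value
lemma snd_ne_of_dropWhile_cons (tail : List (String × Int)) (v : Int) (w : String × Int)
    (ws : List (String × Int)) (hcc : tail.dropWhile (fun q => q.2 == v) = w :: ws) : w.2 ≠ v := by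
  have hne : tail.dropWhile (fun q => q.2 == v) ≠ [] := by rw [hcc]; simp
  have h1 := List.head_dropWhile_not (fun (q : String × Int) => q.2 == v) hne
  have h2 : (tail.dropWhile (fun q => q.2 == v)).head hne = w := by simp [hcc]
  rw [h2] at h1
  simpa using h1

-- the main loop correspondence: A's run-scan from any run boundary equals B's per-element fold
lemma aLoop_eq_foldl (ord : List (String × Int)) (hs : ord.Pairwise (fun a b => b.2 ≤ a.2)) :
    ∀ (n : Nat) (rest pre : List (String × Int)) (st : TieSt) (rank : Int),
      rest.length ≤ n →
      ord = pre ++ rest →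
      (∀ x ∈ pre, ∀ y ∈ rest, y.2 < x.2) →
      rank = ((PySem.Set.ofList (pre.map (·.2))).length : Int) →
      aLoop rest rank st = rest.foldl (bStep ord (ord.map (·.2))) st := by
  intro n
  induction n with
  | zero =>
    intro rest pre st rank hlen _ _ _
    have hnil : rest = [] := List.length_eq_zero_iff.mp (Nat.le_zero.mp hlen)
    subst hnil
    rw [aLoop]
    rfl
  | succ n ih =>
    intro rest pre st rank hlen hord hpre hrank
    subst hrank
    rcases rest with _ | ⟨⟨p, v⟩, tail⟩
    · rw [aLoop]
      rfl
    obtain ⟨run, hrun⟩ : ∃ r, r = (p, v) :: tail.takeWhile (fun q => q.2 == v) := ⟨_, rfl⟩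
    obtain ⟨rest', hrest'⟩ : ∃ r, r = tail.dropWhile (fun q => q.2 == v) := ⟨_, rfl⟩
    have hsplit : (p, v) :: tail = run ++ rest' := by
      rw [hrun, hrest']
      simp [List.takeWhile_append_dropWhile]
    have hrunv : ∀ q ∈ run, q.2 = v := by
      intro q hq
      rw [hrun] at hq
      rcases List.mem_cons.mp hq with rfl | hq
      · rfl
      · simpa using List.mem_takeWhile_imp hq
    have hrunlen : 1 ≤ run.length := by rw [hrun]; simp
    have hpw : ((p, v) :: tail).Pairwise (fun a b => b.2 ≤ a.2) :=
      (List.pairwise_append.mp (hord ▸ hs)).2.1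
    have hheadle : ∀ y ∈ tail, y.2 ≤ v := fun y hy => (List.pairwise_cons.mp hpw).1 y hy
    have hmem_rest' : ∀ y ∈ rest', y ∈ tail := by
      intro y hy
      rw [hrest'] at hy
      have htl : tail = tail.takeWhile (fun q => q.2 == v) ++ tail.dropWhile (fun q => q.2 == v) :=
        (List.takeWhile_append_dropWhile).symm
      rw [htl]
      exact List.mem_append_right _ hy
    have hrest'pw : rest'.Pairwise (fun a b => b.2 ≤ a.2) :=
      (List.pairwise_append.mp (hsplit ▸ hpw)).2.1
    have hrest'_lt : ∀ y ∈ rest', y.2 < v := by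
      intro y hy
      cases hcase : rest' with
      | nil => rw [hcase] at hy; simp at hy
      | cons w ws =>
        have hwv : w.2 ≠ v := snd_ne_of_dropWhile_cons tail v w ws (by rw [← hrest']; exact hcase)
        have hwlt : w.2 < v :=
          lt_of_le_of_ne (hheadle w (hmem_rest' w (by rw [hcase]; simp))) hwv
        rw [hcase] at hy
        rcases List.mem_cons.mp hy with rfl | hy
        · exact hwlt
        · have hle : y.2 ≤ w.2 := (List.pairwise_cons.mp (hcase ▸ hrest'pw)).1 y hy
          omega
    have hprev : ∀ x ∈ pre, v < x.2 := fun x hx => hpre x hx (p, v) (by simp)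
    have hord2 : ord = pre ++ (run ++ rest') := by rw [hord, hsplit]
    have hvnotpre : v ∉ pre.map (·.2) := by
      intro hv
      rcases List.mem_map.mp hv with ⟨x, hx, hxv⟩
      have := hprev x hx
      omega
    have hf1 : (pre.map (·.2)).filter (fun u => decide (v < u)) = pre.map (·.2) :=
      List.filter_eq_self.mpr (by
        intro a ha
        rcases List.mem_map.mp ha with ⟨x, hx, rfl⟩
        simpa using hprev x hx)
    have hf2 : (run.map (·.2)).filter (fun u => decide (v < u)) = [] :=
      List.filter_eq_nil_iff.mpr (by
        intro a ha
        rcases List.mem_map.mp ha with ⟨q, hq, rfl⟩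
        rw [hrunv q hq]
        simp)
    have hf3 : (rest'.map (·.2)).filter (fun u => decide (v < u)) = [] :=
      List.filter_eq_nil_iff.mpr (by
        intro a ha
        rcases List.mem_map.mp ha with ⟨q, hq, rfl⟩
        have := hrest'_lt q hq
        simp only [decide_eq_true_eq]
        omega)
    have hfilter : (ord.map (·.2)).filter (fun u => decide (v < u)) = pre.map (·.2) := by
      rw [hord2, List.map_append, List.map_append, List.filter_append, List.filter_append,
        hf1, hf2, hf3]
      simp
    have hrep : run.map (·.2) = List.replicate run.length v := by
      have h0 := List.eq_replicate_of_mem (a := v) (l := run.map (·.2)) (by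
        intro b hb
        rcases List.mem_map.mp hb with ⟨q, hq, rfl⟩
        exact hrunv q hq)
      rwa [List.length_map] at h0
    have hc1 : (pre.map (·.2)).count v = 0 := List.count_eq_zero.mpr hvnotpre
    have hc3 : (rest'.map (·.2)).count v = 0 :=
      List.count_eq_zero.mpr (by
        intro hv
        rcases List.mem_map.mp hv with ⟨q, hq, hqv⟩
        have := hrest'_lt q hq
        omega)
    have hcount : (ord.map (·.2)).count v = run.length := by
      rw [hord2, List.map_append, List.map_append, List.count_append, List.count_append,
        hc1, hc3, hrep, List.count_replicate]
      simp
    have hoth : ∀ (s : String),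
        ord.filter (fun r => r.2 == v && r.1 != s) = run.filter (fun r => r.1 != s) := by
      intro s
      have ho1 : pre.filter (fun r => r.2 == v && r.1 != s) = [] :=
        List.filter_eq_nil_iff.mpr (by
          intro r hr
          have := hprev r hr
          simp only [Bool.and_eq_true, beq_iff_eq, not_and]
          intro hcon
          omega)
      have ho2 : run.filter (fun r => r.2 == v && r.1 != s) = run.filter (fun r => r.1 != s) :=
        List.filter_congr (by
          intro r hr
          rw [hrunv r hr]
          simp)
      have ho3 : rest'.filter (fun r => r.2 == v && r.1 != s) = [] :=
        List.filter_eq_nil_iff.mpr (by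
          intro r hr
          have := hrest'_lt r hr
          simp only [Bool.and_eq_true, beq_iff_eq, not_and]
          intro hcon
          omega)
      rw [hord2, List.filter_append, List.filter_append, ho1, ho2, ho3]
      simp
    have hgrp : run.foldl (bStep ord (ord.map (·.2))) st
        = aEmitGroup st (run.map (·.1)) (((PySem.Set.ofList (pre.map (·.2))).length : Int) + 1) := by
      by_cases hlen1 : 1 < run.length
      · rw [aEmitGroup.eq_def, if_pos (by simpa using hlen1), List.foldl_map]
        apply PySem.List.foldl_congr_mem
        intro acc q hq
        have hq2 : q.2 = v := hrunv q hq
        simp only [bStep, hq2, hfilter, hcount, if_pos hlen1, hoth q.1]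
        rw [List.filter_map]
        rfl
      · have hone : run.length = 1 := by omega
        have htake : tail.takeWhile (fun q => q.2 == v) = [] := by
          rw [hrun] at hone
          exact List.length_eq_zero_iff.mp (by simpa using hone)
        have hrun1 : run = [(p, v)] := by rw [hrun, htake]
        rw [hrun1]
        simp only [List.foldl_cons, List.foldl_nil, bStep]
        rw [hfilter, hcount, hone, if_neg (by omega), aEmitGroup.eq_def]
        simp
    have hlen' : rest'.length ≤ n := by
      have h1 : rest'.length ≤ tail.length := by
        rw [hrest']
        exact List.length_dropWhile_le _ _
      simp only [List.length_cons] at hlen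
      omega
    have hord' : ord = (pre ++ run) ++ rest' := by rw [hord2, List.append_assoc]
    have hpre' : ∀ x ∈ pre ++ run, ∀ y ∈ rest', y.2 < x.2 := by
      intro x hx y hy
      rcases List.mem_append.mp hx with hx | hx
      · exact hpre x hx y (by rw [hsplit]; exact List.mem_append_right _ hy)
      · rw [hrunv x hx]
        exact hrest'_lt y hy
    have hrank' : ((PySem.Set.ofList (pre.map (·.2))).length : Int) + 1
        = ((PySem.Set.ofList ((pre ++ run).map (·.2))).length : Int) := by
      rw [List.map_append, hrep,
        ofList_append_replicate_len (pre.map (·.2)) v run.length hrunlen hvnotpre]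
      push_cast
      ring
    calc aLoop ((p, v) :: tail) (((PySem.Set.ofList (pre.map (·.2))).length : Int)) st
        = aLoop rest' (((PySem.Set.ofList (pre.map (·.2))).length : Int) + 1)
            (aEmitGroup st (run.map (·.1)) (((PySem.Set.ofList (pre.map (·.2))).length : Int) + 1)) := by
          rw [aLoop, ← hrun, ← hrest']
      _ = rest'.foldl (bStep ord (ord.map (·.2)))
            (aEmitGroup st (run.map (·.1)) (((PySem.Set.ofList (pre.map (·.2))).length : Int) + 1)) :=
          ih rest' (pre ++ run) _ _ hlen' hord' hpre' hrank'
      _ = rest'.foldl (bStep ord (ord.map (·.2))) (run.foldl (bStep ord (ord.map (·.2))) st) := by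
          rw [hgrp]
      _ = (run ++ rest').foldl (bStep ord (ord.map (·.2))) st := (List.foldl_append).symm
      _ = ((p, v) :: tail).foldl (bStep ord (ord.map (·.2))) st := by rw [← hsplit]

-- ===== VERDICT (by name: the statement is the Claim_ definition above) =====
theorem compute_ties_spec : Claim_equal_compute_ties := by
  intro players points _
  unfold Spec_compute_ties compute_ties compute_ties_alt
  simp only []
  set ord := PySem.List.sorted2 (players.map (fun p => (p, (PySem.Dict.mk points).getD p 0)))
      (fun kv => -kv.2) (fun kv => kv.1) false with hord
  rw [aLoop_eq_foldl ord (sorted2_snd_ge _) ord.length ord [] _ 0 le_rfl rfl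
    (by intro x hx; simp at hx) (by simp)]
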